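-- pv_equiv track=rewrite | github.com/rullo24/BarcodeML | task1.py | get_max_min_edges_conn_labels
-- ===== SOURCE A (Python) =====
-- def get_max_min_edges_conn_labels(groups):
--     simplified_groups = []
--     for curr_label in groups:
--         min_x = min(x for x, _, _, _ in curr_label)
--         min_y = min(y for _, y, _, _ in curr_label)
--         max_x = max(x for x, _, _, _ in curr_label)
--         max_y = max(y for _, y, _, _ in curr_label)
--         min_w = min(w for _, _, w, _ in curr_label)
--         max_h = max(h for _, _, _, h in curr_label)
--
--         simply_group_tuple = (min_x, min_y, (max_x - min_x + min_w), (max_y - min_y + max_h))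
--         simplified_groups.append(simply_group_tuple) # extra brackets for appending a tuple
--     return simplified_groups
-- ===== SOURCE B (Python) =====
-- def get_max_min_edges_conn_labels(groups):
--     out = []
--     for group in groups:
--         x0, y0, w0, h0 = group[0]
--         min_x, min_y, max_x, max_y, min_w, max_h = x0, y0, x0, y0, w0, h0
--         for x, y, w, h in group[1:]:
--             if x < min_x: min_x = x
--             if y < min_y: min_y = y
--             if x > max_x: max_x = x
--             if y > max_y: max_y = y
--             if w < min_w: min_w = w
--             if h > max_h: max_h = h
--         out.append((min_x, min_y, max_x - min_x + min_w, max_y - min_y + max_h))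
--     return out
-- ===== Notes on version B (the rewrite author's own statement) =====
-- stated objective: simpler
-- what changed: Replaces the six separate generator-expression min()/max() passes over each group with one fused loop per group maintaining six running accumulators seeded from the first element.
import Mathlib
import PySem

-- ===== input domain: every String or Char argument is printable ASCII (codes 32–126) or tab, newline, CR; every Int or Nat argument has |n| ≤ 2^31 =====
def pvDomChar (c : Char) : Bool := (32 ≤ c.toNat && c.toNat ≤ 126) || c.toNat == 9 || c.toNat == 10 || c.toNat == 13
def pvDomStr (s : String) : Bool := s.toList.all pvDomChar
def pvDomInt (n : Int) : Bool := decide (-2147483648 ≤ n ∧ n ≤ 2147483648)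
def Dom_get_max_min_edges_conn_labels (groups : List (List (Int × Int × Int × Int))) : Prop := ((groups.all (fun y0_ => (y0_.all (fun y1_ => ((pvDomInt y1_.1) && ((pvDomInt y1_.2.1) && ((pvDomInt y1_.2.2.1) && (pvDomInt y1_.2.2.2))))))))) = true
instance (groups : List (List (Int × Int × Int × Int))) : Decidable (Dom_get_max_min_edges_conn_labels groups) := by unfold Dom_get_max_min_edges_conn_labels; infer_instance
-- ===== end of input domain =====

-- B fuses A's six separate min()/max() passes per group into one accumulator loop (objective: simpler).

-- ===== PORT A =====
-- Six whole-group extrema per group via PySem.List.min?/max?; Python's min/max raise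
-- ValueError on an empty group, so Pre_ excludes empty groups and .getD 0 is never used there.
def get_max_min_edges_conn_labels (groups : List (List (Int × Int × Int × Int))) : List (Int × Int × Int × Int) :=
  groups.foldl (fun simplified_groups curr_label =>
    let min_x := (PySem.List.min? (curr_label.map fun t => t.1) (fun y => y)).getD 0
    let min_y := (PySem.List.min? (curr_label.map fun t => t.2.1) (fun y => y)).getD 0
    let max_x := (PySem.List.max? (curr_label.map fun t => t.1) (fun y => y)).getD 0
    let max_y := (PySem.List.max? (curr_label.map fun t => t.2.1) (fun y => y)).getD 0
    let min_w := (PySem.List.min? (curr_label.map fun t => t.2.2.1) (fun y => y)).getD 0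
    let max_h := (PySem.List.max? (curr_label.map fun t => t.2.2.2) (fun y => y)).getD 0
    simplified_groups ++ [(min_x, min_y, max_x - min_x + min_w, max_y - min_y + max_h)]) []

-- ===== PORT B =====
-- one fused pass per group; on an empty group Python B raises (excluded by Pre_), here (0,0,0,0)
def get_max_min_edges_conn_labels_alt (groups : List (List (Int × Int × Int × Int))) : List (Int × Int × Int × Int) :=
  groups.foldl (fun out group =>
    match group with
    | [] => out ++ [(0, 0, 0, 0)]
    | (x0, y0, w0, h0) :: rest =>
      let acc := rest.foldl (fun (s : Int × Int × Int × Int × Int × Int) p =>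
        let (mx, my, Mx, My, mw, Mh) := s
        let (x, y, w, h) := p
        (if x < mx then x else mx, if y < my then y else my,
         if x > Mx then x else Mx, if y > My then y else My,
         if w < mw then w else mw, if h > Mh then h else Mh)) (x0, y0, x0, y0, w0, h0)
      let (mx, my, Mx, My, mw, Mh) := acc
      out ++ [(mx, my, Mx - mx + mw, My - my + Mh)]) []

-- ===== PRECONDITION & SPEC =====
-- Pre_ excludes inputs containing an empty group, on which Python A raises ValueError (min() of empty sequence).
def Pre_get_max_min_edges_conn_labels (groups : List (List (Int × Int × Int × Int))) : Prop :=
  ∀ g ∈ groups, g ≠ []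
instance (groups : List (List (Int × Int × Int × Int))) : Decidable (Pre_get_max_min_edges_conn_labels groups) := by unfold Pre_get_max_min_edges_conn_labels; infer_instance
def pvWitness_get_max_min_edges_conn_labels : (List (List (Int × Int × Int × Int))) := [[(1, 2, 3, 4), (0, 5, 2, 2)], [(7, 7, 1, 1)]]
def Spec_get_max_min_edges_conn_labels (groups : List (List (Int × Int × Int × Int))) (out : List (Int × Int × Int × Int)) : Prop := out = get_max_min_edges_conn_labels_alt groups
instance (groups : List (List (Int × Int × Int × Int))) (out : List (Int × Int × Int × Int)) : Decidable (Spec_get_max_min_edges_conn_labels groups out) := by unfold Spec_get_max_min_edges_conn_labels; infer_instance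

-- ===== CLAIM (what is proved, stated in full; the proofs are below) =====
def Claim_equal_get_max_min_edges_conn_labels : Prop := ∀ (groups : List (List (Int × Int × Int × Int))), Dom_get_max_min_edges_conn_labels groups → Pre_get_max_min_edges_conn_labels groups → Spec_get_max_min_edges_conn_labels groups (get_max_min_edges_conn_labels groups)

-- ===== LEMMAS AND PROOFS =====

-- fused six-accumulator fold = six separate foldl min/max
theorem fold6_eq (t : List (Int × Int × Int × Int)) (mx my Mx My mw Mh : Int) :
    t.foldl (fun (s : Int × Int × Int × Int × Int × Int) p =>
        let (mx, my, Mx, My, mw, Mh) := s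
        let (x, y, w, h) := p
        (if x < mx then x else mx, if y < my then y else my,
         if x > Mx then x else Mx, if y > My then y else My,
         if w < mw then w else mw, if h > Mh then h else Mh)) (mx, my, Mx, My, mw, Mh)
      = ((t.map fun p => p.1).foldl min mx, (t.map fun p => p.2.1).foldl min my,
         (t.map fun p => p.1).foldl max Mx, (t.map fun p => p.2.1).foldl max My,
         (t.map fun p => p.2.2.1).foldl min mw, (t.map fun p => p.2.2.2).foldl max Mh) := by
  induction t generalizing mx my Mx My mw Mh with
  | nil => rfl
  | cons a t ih =>
    obtain ⟨x, y, w, h⟩ := a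
    have hmin : ∀ u v : Int, (if v < u then v else u) = min u v := by
      intro u v; rcases lt_or_ge v u <;> simp [min_def] <;> omega
    have hmax : ∀ u v : Int, (if v > u then v else u) = max u v := by
      intro u v; rcases lt_or_ge u v <;> simp [max_def] <;> omega
    simp only [List.foldl_cons, List.map_cons]
    rw [ih]
    simp only [hmin, hmax]

def tupleA (curr_label : List (Int × Int × Int × Int)) : Int × Int × Int × Int :=
  let min_x := (PySem.List.min? (curr_label.map fun t => t.1) (fun y => y)).getD 0
  let min_y := (PySem.List.min? (curr_label.map fun t => t.2.1) (fun y => y)).getD 0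
  let max_x := (PySem.List.max? (curr_label.map fun t => t.1) (fun y => y)).getD 0
  let max_y := (PySem.List.max? (curr_label.map fun t => t.2.1) (fun y => y)).getD 0
  let min_w := (PySem.List.min? (curr_label.map fun t => t.2.2.1) (fun y => y)).getD 0
  let max_h := (PySem.List.max? (curr_label.map fun t => t.2.2.2) (fun y => y)).getD 0
  (min_x, min_y, max_x - min_x + min_w, max_y - min_y + max_h)

def tupleB (group : List (Int × Int × Int × Int)) : Int × Int × Int × Int :=
  match group with
  | [] => (0, 0, 0, 0)
  | (x0, y0, w0, h0) :: rest =>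
    let acc := rest.foldl (fun (s : Int × Int × Int × Int × Int × Int) p =>
      let (mx, my, Mx, My, mw, Mh) := s
      let (x, y, w, h) := p
      (if x < mx then x else mx, if y < my then y else my,
       if x > Mx then x else Mx, if y > My then y else My,
       if w < mw then w else mw, if h > Mh then h else Mh)) (x0, y0, x0, y0, w0, h0)
    let (mx, my, Mx, My, mw, Mh) := acc
    (mx, my, Mx - mx + mw, My - my + Mh)

theorem A_eq_map (gs : List (List (Int × Int × Int × Int))) :
    get_max_min_edges_conn_labels gs = gs.map tupleA := by
  unfold get_max_min_edges_conn_labels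
  suffices h : ∀ init : List (Int × Int × Int × Int),
      gs.foldl (fun simplified_groups curr_label => simplified_groups ++ [tupleA curr_label]) init
        = init ++ gs.map tupleA by
    simpa using h []
  induction gs with
  | nil => intro init; simp
  | cons g gs ih => intro init; simp [List.foldl_cons, ih]

theorem B_eq_map (gs : List (List (Int × Int × Int × Int))) :
    get_max_min_edges_conn_labels_alt gs = gs.map tupleB := by
  unfold get_max_min_edges_conn_labels_alt
  suffices h : ∀ init : List (Int × Int × Int × Int),
      gs.foldl (fun out group => out ++ [tupleB group]) init = init ++ gs.map tupleB by
    have e : (fun (out : List (Int × Int × Int × Int)) (group : List (Int × Int × Int × Int)) =>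
        match group with
        | [] => out ++ [((0 : Int), (0 : Int), (0 : Int), (0 : Int))]
        | (x0, y0, w0, h0) :: rest =>
          let acc := rest.foldl (fun (s : Int × Int × Int × Int × Int × Int) p =>
            let (mx, my, Mx, My, mw, Mh) := s
            let (x, y, w, h) := p
            (if x < mx then x else mx, if y < my then y else my,
             if x > Mx then x else Mx, if y > My then y else My,
             if w < mw then w else mw, if h > Mh then h else Mh)) (x0, y0, x0, y0, w0, h0)
          let (mx, my, Mx, My, mw, Mh) := acc
          out ++ [(mx, my, Mx - mx + mw, My - my + Mh)])
        = (fun out group => out ++ [tupleB group]) := by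
      funext out group
      cases group with
      | nil => rfl
      | cons a rest => obtain ⟨x0, y0, w0, h0⟩ := a; rfl
    rw [e]; simpa using h []
  induction gs with
  | nil => intro init; simp
  | cons g gs ih => intro init; simp [List.foldl_cons, ih]

theorem tuple_eq (g : List (Int × Int × Int × Int)) (hg : g ≠ []) : tupleA g = tupleB g := by
  cases g with
  | nil => exact absurd rfl hg
  | cons a rest =>
    obtain ⟨x0, y0, w0, h0⟩ := a
    simp only [tupleA, tupleB, List.map_cons, PySem.List.min?_id_cons, PySem.List.max?_id_cons,
      Option.getD_some, fold6_eq]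

theorem get_max_min_edges_conn_labels_spec : Claim_equal_get_max_min_edges_conn_labels := by
  intro groups _ hpre
  unfold Spec_get_max_min_edges_conn_labels
  rw [A_eq_map, B_eq_map]
  exact List.map_congr_left fun g hg => tuple_eq g (hpre g hg)
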